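-- pv_equiv track=rewrite | github.com/DamianWnorowski/consciousness-nexus | auto_test_generation.py | generate_test_parameters
-- ===== SOURCE A (Python) =====
-- from typing import Dict, List, Any, Optional, Set
--
-- def generate_test_parameters(params: List[Dict[str, Any]]) -> Dict[str, Any]:
--     """Generate test parameters based on function signature"""
--     setup_lines = []
--     call_args = []
--     param_list = []
--
--     for param in params:
--         param_name = param["name"]
--         param_type = param.get("type_hint")
--
--         param_list.append(param_name)
--
--         # Generate test value based on type hints and name
--         if "str" in str(param_type).lower() or "string" in param_name.lower():
--             test_value = f'"{param_name}_test"'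
--             setup_lines.append(f'{param_name} = "{param_name}_test"')
--         elif "int" in str(param_type).lower() or "count" in param_name.lower():
--             test_value = "42"
--             setup_lines.append(f'{param_name} = 42')
--         elif "float" in str(param_type).lower():
--             test_value = "3.14"
--             setup_lines.append(f'{param_name} = 3.14')
--         elif "bool" in str(param_type).lower():
--             test_value = "True"
--             setup_lines.append(f'{param_name} = True')
--         elif "list" in str(param_type).lower():
--             test_value = "[1, 2, 3]"
--             setup_lines.append(f'{param_name} = [1, 2, 3]')
--         elif "dict" in str(param_type).lower():
--             test_value = '{"key": "value"}'
--             setup_lines.append(f'{param_name} = {{"key": "value"}}')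
--         else:
--             test_value = f'"{param_name}_mock"'
--             setup_lines.append(f'{param_name} = "{param_name}_mock"  # Mock object')
--
--         call_args.append(f"{param_name}={param_name}")
--
--     return {
--         "setup": "\n".join(setup_lines),
--         "call_args": ", ".join(call_args),
--         "param_list": ", ".join(param_list),
--         "description": f"{len(params)} parameters"
--     }
-- ===== SOURCE B (Python) =====
-- _KEYWORDS = ("str", "int", "float", "bool", "list", "dict")
--
-- _TEMPLATES = {
--     "str": '{n} = "{n}_test"',
--     "int": '{n} = 42',
--     "float": '{n} = 3.14',
--     "bool": '{n} = True',
--     "list": '{n} = [1, 2, 3]',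
--     "dict": '{n} = {{"key": "value"}}',
--     None: '{n} = "{n}_mock"  # Mock object',
-- }
--
--
-- def _category(name_lower, type_lower):
--     """First type keyword contained in the type string, then name overrides:
--     a 'string' name forces str; a 'count' name forces int unless str already won."""
--     cat = next((k for k in _KEYWORDS if k in type_lower), None)
--     if "string" in name_lower:
--         return "str"
--     if "count" in name_lower and cat != "str":
--         return "int"
--     return cat
--
--
-- def _parts(params):
--     """Recursively build the three joined strings back-to-front."""
--     if not params:
--         return "", "", ""
--     p, rest = params[0], params[1:]
--     name = p["name"]
--     line = _TEMPLATES[_category(name.lower(), str(p.get("type_hint")).lower())].format(n=name)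
--     if not rest:
--         return line, f"{name}={name}", name
--     s, c, pl = _parts(rest)
--     return f"{line}\n{s}", f"{name}={name}, {c}", f"{name}, {pl}"
--
--
-- def generate_test_parameters(params):
--     setup, call_args, param_list = _parts(params)
--     return {
--         "setup": setup,
--         "call_args": call_args,
--         "param_list": param_list,
--         "description": f"{len(params)} parameters",
--     }
-- ===== Notes on version B (the rewrite author's own statement) =====
-- stated objective: alternative
-- what changed: Instead of one loop that accumulates three lists through an if/elif chain and joins them at the end, B recurses over the parameter list building the three joined strings directly back-to-front, and picks each setup line by scanning a keyword tuple for the first keyword contained in the type string, applying name-based overrides, and instantiating a template from a category-keyed dict; the unused test_value assignments are dropped.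
import Mathlib
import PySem

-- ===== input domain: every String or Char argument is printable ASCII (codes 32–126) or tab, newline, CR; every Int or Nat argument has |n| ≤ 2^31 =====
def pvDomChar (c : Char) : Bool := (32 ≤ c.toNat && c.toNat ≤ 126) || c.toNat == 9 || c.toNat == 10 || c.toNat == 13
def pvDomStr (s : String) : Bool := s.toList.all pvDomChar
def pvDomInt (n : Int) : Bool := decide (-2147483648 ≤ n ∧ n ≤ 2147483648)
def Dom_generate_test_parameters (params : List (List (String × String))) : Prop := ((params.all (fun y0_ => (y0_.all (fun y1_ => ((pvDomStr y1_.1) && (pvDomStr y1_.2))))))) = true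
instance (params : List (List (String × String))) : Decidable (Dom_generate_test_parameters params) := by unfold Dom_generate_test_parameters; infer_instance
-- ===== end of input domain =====

-- B replaces A's single accumulating loop + if/elif chain by a recursion that builds the three
-- joined strings directly back-to-front, choosing each setup line via keyword scan + name
-- overrides + a template table; Pre_ excludes params lacking a "name" key (Python A raises KeyError).


-- ===== PORT A =====
-- one iteration of A's loop over the three accumulators (setup_lines, call_args, param_list)
def pvStepA (acc : List String × List String × List String) (param : List (String × String)) :
    List String × List String × List String :=
  let param_name := (PySem.Dict.mk param).getD "name" ""   -- param["name"]; KeyError (missing key) excluded by Pre_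
  let param_type := (PySem.Dict.mk param).get? "type_hint"
  let param_list := acc.2.2 ++ [param_name]
  let ts := PySem.Str.lower (match param_type with | some s => s | none => "None")  -- str(param_type).lower()
  let setup_lines :=
    if PySem.Str.isIn "str" ts || PySem.Str.isIn "string" (PySem.Str.lower param_name) then
      acc.1 ++ [param_name ++ " = \"" ++ param_name ++ "_test\""]
    else if PySem.Str.isIn "int" ts || PySem.Str.isIn "count" (PySem.Str.lower param_name) then
      acc.1 ++ [param_name ++ " = 42"]
    else if PySem.Str.isIn "float" ts then
      acc.1 ++ [param_name ++ " = 3.14"]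
    else if PySem.Str.isIn "bool" ts then
      acc.1 ++ [param_name ++ " = True"]
    else if PySem.Str.isIn "list" ts then
      acc.1 ++ [param_name ++ " = [1, 2, 3]"]
    else if PySem.Str.isIn "dict" ts then
      acc.1 ++ [param_name ++ " = {\"key\": \"value\"}"]
    else
      acc.1 ++ [param_name ++ " = \"" ++ param_name ++ "_mock\"  # Mock object"]
  let call_args := acc.2.1 ++ [param_name ++ "=" ++ param_name]
  (setup_lines, call_args, param_list)

def generate_test_parameters (params : List (List (String × String))) : List (String × String) :=
  let st := params.foldl pvStepA ([], [], [])
  [("setup", PySem.Str.join "\n" st.1),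
   ("call_args", PySem.Str.join ", " st.2.1),
   ("param_list", PySem.Str.join ", " st.2.2),
   ("description", PySem.Int.toStr (params.length : Int) ++ " parameters")]

-- ===== PORT B =====
-- first type keyword contained in the type string, then the name overrides
def pvCategory (nl t : String) : Option String :=
  let cat := ["str", "int", "float", "bool", "list", "dict"].find? (fun k => PySem.Str.isIn k t)
  if PySem.Str.isIn "string" nl then some "str"
  else if PySem.Str.isIn "count" nl && !(cat == some "str") then some "int"
  else cat

-- _TEMPLATES[cat].format(n=name): the category-keyed template table, instantiated at n
def pvTemplate (cat : Option String) (n : String) : String :=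
  match cat with
  | some "str" => n ++ " = \"" ++ n ++ "_test\""
  | some "int" => n ++ " = 42"
  | some "float" => n ++ " = 3.14"
  | some "bool" => n ++ " = True"
  | some "list" => n ++ " = [1, 2, 3]"
  | some "dict" => n ++ " = {\"key\": \"value\"}"
  | _ => n ++ " = \"" ++ n ++ "_mock\"  # Mock object"

-- recursively build the three joined strings back-to-front
def pvParts : List (List (String × String)) → String × String × String
  | [] => ("", "", "")
  | p :: rest =>
    let name := (PySem.Dict.mk p).getD "name" ""   -- p["name"]; missing key excluded by Pre_
    let line := pvTemplate (pvCategory (PySem.Str.lower name)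
      (PySem.Str.lower (match (PySem.Dict.mk p).get? "type_hint" with | some s => s | none => "None"))) name
    match rest with
    | [] => (line, name ++ "=" ++ name, name)
    | _ =>
      let r := pvParts rest
      (line ++ "\n" ++ r.1, name ++ "=" ++ name ++ ", " ++ r.2.1, name ++ ", " ++ r.2.2)

def generate_test_parameters_alt (params : List (List (String × String))) : List (String × String) :=
  let st := pvParts params
  [("setup", st.1),
   ("call_args", st.2.1),
   ("param_list", st.2.2),
   ("description", PySem.Int.toStr (params.length : Int) ++ " parameters")]

-- ===== PRECONDITION & SPEC =====
-- Pre_ excludes exactly the inputs on which Python A raises KeyError: a param dict without a "name" key.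
def Pre_generate_test_parameters (params : List (List (String × String))) : Prop :=
  (params.all (fun p => (PySem.Dict.mk p).contains "name")) = true
instance (params : List (List (String × String))) : Decidable (Pre_generate_test_parameters params) := by
  unfold Pre_generate_test_parameters; infer_instance

def pvWitness_generate_test_parameters : (List (List (String × String))) :=
  [[("name", "x"), ("type_hint", "int")], [("name", "s")]]

def Spec_generate_test_parameters (params : List (List (String × String))) (out : List (String × String)) : Prop := out = generate_test_parameters_alt params
instance (params : List (List (String × String))) (out : List (String × String)) : Decidable (Spec_generate_test_parameters params out) := by unfold Spec_generate_test_parameters; infer_instance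

-- ===== CLAIM (what is proved, stated in full; the proofs are below) =====
def Claim_equal_generate_test_parameters : Prop := ∀ (params : List (List (String × String))), Dom_generate_test_parameters params → Pre_generate_test_parameters params → Spec_generate_test_parameters params (generate_test_parameters params)

-- ===== LEMMAS AND PROOFS =====

-- A's per-param setup line, extracted from pvStepA (proof helper)
def pvLineAux (n : String) (th : Option String) : String :=
  let ts := PySem.Str.lower (match th with | some s => s | none => "None")
  if PySem.Str.isIn "str" ts || PySem.Str.isIn "string" (PySem.Str.lower n) then
    n ++ " = \"" ++ n ++ "_test\""
  else if PySem.Str.isIn "int" ts || PySem.Str.isIn "count" (PySem.Str.lower n) then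
    n ++ " = 42"
  else if PySem.Str.isIn "float" ts then n ++ " = 3.14"
  else if PySem.Str.isIn "bool" ts then n ++ " = True"
  else if PySem.Str.isIn "list" ts then n ++ " = [1, 2, 3]"
  else if PySem.Str.isIn "dict" ts then n ++ " = {\"key\": \"value\"}"
  else n ++ " = \"" ++ n ++ "_mock\"  # Mock object"

lemma foldA_eq (params : List (List (String × String))) (a b c : List String) :
    params.foldl pvStepA (a, b, c) =
      (a ++ params.map (fun p => pvLineAux ((PySem.Dict.mk p).getD "name" "") ((PySem.Dict.mk p).get? "type_hint")),
       b ++ params.map (fun p => ((PySem.Dict.mk p).getD "name" "") ++ "=" ++ ((PySem.Dict.mk p).getD "name" "")),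
       c ++ params.map (fun p => (PySem.Dict.mk p).getD "name" "")) := by
  induction params generalizing a b c with
  | nil => simp
  | cons p rest ih =>
    rw [List.foldl_cons, List.map_cons, List.map_cons, List.map_cons]
    show rest.foldl pvStepA (pvStepA (a, b, c) p) = _
    rw [show pvStepA (a, b, c) p =
        (a ++ [pvLineAux ((PySem.Dict.mk p).getD "name" "") ((PySem.Dict.mk p).get? "type_hint")],
         b ++ [((PySem.Dict.mk p).getD "name" "") ++ "=" ++ ((PySem.Dict.mk p).getD "name" "")],
         c ++ [(PySem.Dict.mk p).getD "name" ""]) from by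
      simp only [pvStepA, pvLineAux]; split_ifs <;> rfl]
    rw [ih]; simp

-- B's template∘category equals A's chain line, per param
lemma template_category_eq (n : String) (th : Option String) :
    pvTemplate (pvCategory (PySem.Str.lower n)
      (PySem.Str.lower (match th with | some s => s | none => "None"))) n = pvLineAux n th := by
  unfold pvTemplate pvCategory pvLineAux
  generalize PySem.Str.lower (match th with | some s => s | none => "None") = ts
  generalize PySem.Str.lower n = nl
  rcases h1 : PySem.Str.isIn "str" ts with _ | _ <;>
  rcases h1' : PySem.Str.isIn "string" nl with _ | _ <;>
  rcases h2 : PySem.Str.isIn "int" ts with _ | _ <;>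
  rcases h2' : PySem.Str.isIn "count" nl with _ | _ <;>
  rcases h3 : PySem.Str.isIn "float" ts with _ | _ <;>
  rcases h4 : PySem.Str.isIn "bool" ts with _ | _ <;>
  rcases h5 : PySem.Str.isIn "list" ts with _ | _ <;>
  rcases h6 : PySem.Str.isIn "dict" ts with _ | _ <;>
    simp_all [List.find?]

lemma joinS_cons_cons (sep x y : String) (ys : List String) :
    PySem.Str.join sep (x :: y :: ys) = x ++ sep ++ PySem.Str.join sep (y :: ys) := by
  simp [PySem.Str.join, PySem.Chars.join_cons_cons, String.append_assoc]

lemma joinS_singleton (sep x : String) : PySem.Str.join sep [x] = x := by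
  simp [PySem.Str.join, PySem.Chars.join_singleton]

-- B's recursion computes the joins of the three mapped lists
lemma parts_eq (params : List (List (String × String))) :
    pvParts params =
      (PySem.Str.join "\n" (params.map (fun p => pvLineAux ((PySem.Dict.mk p).getD "name" "") ((PySem.Dict.mk p).get? "type_hint"))),
       PySem.Str.join ", " (params.map (fun p => ((PySem.Dict.mk p).getD "name" "") ++ "=" ++ ((PySem.Dict.mk p).getD "name" ""))),
       PySem.Str.join ", " (params.map (fun p => (PySem.Dict.mk p).getD "name" ""))) := by
  induction params with
  | nil => simp [pvParts, PySem.Str.join, PySem.Chars.join, List.intercalate]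
  | cons p rest ih =>
    cases rest with
    | nil =>
      simp only [pvParts, List.map_cons, List.map_nil, joinS_singleton]
      rw [template_category_eq]
    | cons q rest' =>
      rw [show pvParts (p :: q :: rest') =
        (pvTemplate (pvCategory (PySem.Str.lower ((PySem.Dict.mk p).getD "name" ""))
            (PySem.Str.lower (match (PySem.Dict.mk p).get? "type_hint" with | some s => s | none => "None")))
            ((PySem.Dict.mk p).getD "name" "") ++ "\n" ++ (pvParts (q :: rest')).1,
         ((PySem.Dict.mk p).getD "name" "") ++ "=" ++ ((PySem.Dict.mk p).getD "name" "") ++ ", " ++ (pvParts (q :: rest')).2.1,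
         ((PySem.Dict.mk p).getD "name" "") ++ ", " ++ (pvParts (q :: rest')).2.2) from rfl]
      rw [ih, template_category_eq]
      simp [joinS_cons_cons, String.append_assoc]

-- ===== VERDICT (by name: the statement is the Claim_ definition above) =====
theorem generate_test_parameters_spec : Claim_equal_generate_test_parameters := by
  intro params _ _
  show _ = _
  simp only [generate_test_parameters, generate_test_parameters_alt, foldA_eq, List.nil_append,
    parts_eq]
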